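-- pv_equiv track=rewrite | github.com/EliahKagan/old-practice-snapshot | main/height-of-heap/height-of-heap.py | heap_height
-- ===== SOURCE A (Python) =====
-- def heap_height(size):
--     height = 0
--
--     width = 1
--     while size > 0:
--         height += 1
--         size -= width
--         width *= 2
--
--     return height
-- ===== SOURCE B (Python) =====
-- def heap_height(size):
--     return size.bit_length() if size > 0 else 0
-- ===== Notes on version B (the rewrite author's own statement) =====
-- stated objective: simpler
-- what changed: Replaced the subtract-doubling-widths loop by the closed form size.bit_length() guarded by non-positive size, a one-line loop-free computation.
import Mathlib
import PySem

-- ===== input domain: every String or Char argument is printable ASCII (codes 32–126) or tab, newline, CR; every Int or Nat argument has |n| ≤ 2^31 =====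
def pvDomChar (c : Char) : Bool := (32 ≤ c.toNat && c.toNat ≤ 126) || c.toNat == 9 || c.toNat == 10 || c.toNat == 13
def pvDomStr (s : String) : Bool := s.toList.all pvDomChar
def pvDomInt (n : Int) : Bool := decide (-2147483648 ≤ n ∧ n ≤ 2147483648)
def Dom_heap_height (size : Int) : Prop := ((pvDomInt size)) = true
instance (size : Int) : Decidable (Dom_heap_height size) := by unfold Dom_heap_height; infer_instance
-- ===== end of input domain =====

-- B replaces A's subtract-powers-of-two loop with the closed form bit_length; return values agree on all Int inputs.


-- ===== PORT A =====
-- A's while loop: width starts at 1 (= 2^0) and doubles; the 0 < width argument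
-- only justifies termination (size strictly decreases each iteration).
def heapLoopA (size width height : Int) (hw : 0 < width) : Int :=
  if _h : size > 0 then
    heapLoopA (size - width) (width * 2) (height + 1) (by omega)
  else
    height
termination_by size.toNat
decreasing_by omega

def heap_height (size : Int) : Int := heapLoopA size 1 0 (by norm_num)

-- ===== PORT B =====
-- hand port of Python's int.bit_length for nonnegative ints
def bitLen : Nat → Nat
  | 0 => 0
  | (n + 1) => bitLen ((n + 1) / 2) + 1
decreasing_by omega

def heap_height_alt (size : Int) : Int :=
  if size > 0 then (bitLen size.toNat : Int) else 0

-- ===== PRECONDITION & SPEC =====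
def Spec_heap_height (size : Int) (out : Int) : Prop := out = heap_height_alt size
instance (size : Int) (out : Int) : Decidable (Spec_heap_height size out) := by unfold Spec_heap_height; infer_instance

-- ===== CLAIM (what is proved, stated in full; the proofs are below) =====
def Claim_equal_heap_height : Prop := ∀ (size : Int), Dom_heap_height size → Spec_heap_height size (heap_height size)

-- ===== LEMMAS AND PROOFS =====

theorem bitLen_succ (n : Nat) (h : 0 < n) : bitLen n = bitLen (n / 2) + 1 := by
  cases n with
  | zero => omega
  | succ m => rw [bitLen]

-- the ceiling-division step that matches one loop iteration
theorem ceil_step (n k : Nat) :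
    ((n - 2 ^ k) + (2 ^ (k + 1) - 1)) / 2 ^ (k + 1)
      = ((n + (2 ^ k - 1)) / 2 ^ k) / 2 := by
  have hp : 0 < 2 ^ k := Nat.two_pow_pos k
  have hpe : 2 ^ (k + 1) = 2 * 2 ^ k := by ring
  rw [Nat.div_div_eq_div_mul, ← pow_succ]
  rcases Nat.lt_or_ge (2 ^ k) n with h | h
  swap
  · have h1 : n - 2 ^ k = 0 := by omega
    rw [h1, Nat.div_eq_of_lt (by omega), Nat.div_eq_of_lt (by omega)]
  · have h2 : n - 2 ^ k + (2 ^ (k + 1) - 1) = n + (2 ^ k - 1) := by omega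
    rw [h2]

theorem heapLoopA_eq (m : Nat) : ∀ (s : Int), s.toNat ≤ m → ∀ (k : Nat) (h : Int) (hw : 0 < (2 : Int) ^ k),
    heapLoopA s (2 ^ k) h hw
      = h + (bitLen ((s.toNat + (2 ^ k - 1)) / 2 ^ k) : Int) := by
  induction m with
  | zero =>
    intro s hs k h hw
    have hle : ¬ s > 0 := by omega
    rw [heapLoopA, dif_neg hle]
    have h0 : s.toNat = 0 := by omega
    rw [h0]
    have : (0 + (2 ^ k - 1)) / 2 ^ k = 0 :=
      Nat.div_eq_of_lt (by have := Nat.two_pow_pos k; omega)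
    rw [this]
    simp [bitLen]
  | succ m ih =>
    intro s hs k h hw
    by_cases hpos : s > 0
    · rw [heapLoopA, dif_pos hpos]
      have hrw : (2 : Int) ^ k * 2 = 2 ^ (k + 1) := (pow_succ 2 k).symm
      simp only [hrw]
      have hwp : 0 < (2 : Int) ^ (k + 1) := by positivity
      have hs' : (s - 2 ^ k).toNat ≤ m := by
        have h1 : (1 : Int) ≤ 2 ^ k := one_le_pow₀ (by norm_num)
        omega
      rw [ih (s - 2 ^ k) hs' (k + 1) (h + 1) hwp]
      have htn : (s - 2 ^ k).toNat = s.toNat - 2 ^ k := by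
        have h2 : ((2 : Int) ^ k) = ((2 ^ k : Nat) : Int) := by push_cast; ring
        omega
      rw [htn, ceil_step]
      have hnz : 0 < (s.toNat + (2 ^ k - 1)) / 2 ^ k := by
        apply Nat.div_pos
        · have := Nat.two_pow_pos k; omega
        · exact Nat.two_pow_pos k
      rw [bitLen_succ _ hnz]
      push_cast
      ring
    · rw [heapLoopA, dif_neg hpos]
      have h0 : s.toNat = 0 := by omega
      rw [h0]
      have : (0 + (2 ^ k - 1)) / 2 ^ k = 0 :=
        Nat.div_eq_of_lt (by have := Nat.two_pow_pos k; omega)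
      rw [this]
      simp [bitLen]

-- ===== VERDICT (by name: the statement is the Claim_ definition above) =====
theorem heap_height_spec : Claim_equal_heap_height := by
  intro size _
  unfold Spec_heap_height heap_height heap_height_alt
  have h1 : heapLoopA size 1 0 (by norm_num)
      = heapLoopA size (2 ^ 0) 0 (by norm_num) := by norm_num
  rw [h1, heapLoopA_eq size.toNat size le_rfl 0 0 (by norm_num)]
  by_cases hpos : size > 0
  · simp [hpos]
  · have h0 : size.toNat = 0 := by omega
    simp [hpos, h0, bitLen]
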